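-- pv_equiv track=rewrite | github.com/lcharlesb/CS205_Warm_Up | splitInput.py | splitInput
-- ===== SOURCE A (Python) =====
-- def splitInput(userInput):
--     returnArray = list()
--
--     splitArray = userInput.split(' ')
--
--     returnArray.append(splitArray[0])
--     splitArray.pop(0)
--
--     if(len(splitArray) > 0):
--
--         restOfString = ""
--
--         for word in splitArray:
--             restOfString += word + " "
--
--         returnArray.append(restOfString.rstrip())
--
--     else:
--
--         returnArray.append(" ")
--
--     return returnArray
-- ===== SOURCE B (Python) =====
-- def splitInput(userInput):
--     idx = userInput.find(' ')
--     if idx == -1: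
--         return [userInput, ' ']
--     return [userInput[:idx], userInput[idx + 1:].rstrip()]
-- ===== Notes on version B (the rewrite author's own statement) =====
-- stated objective: simpler
-- what changed: Replaces split-into-all-tokens plus a string-concatenation loop rebuilding the remainder with a single find of the first space and two slices (plus rstrip), eliminating the token list and the accumulator.
import Mathlib
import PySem

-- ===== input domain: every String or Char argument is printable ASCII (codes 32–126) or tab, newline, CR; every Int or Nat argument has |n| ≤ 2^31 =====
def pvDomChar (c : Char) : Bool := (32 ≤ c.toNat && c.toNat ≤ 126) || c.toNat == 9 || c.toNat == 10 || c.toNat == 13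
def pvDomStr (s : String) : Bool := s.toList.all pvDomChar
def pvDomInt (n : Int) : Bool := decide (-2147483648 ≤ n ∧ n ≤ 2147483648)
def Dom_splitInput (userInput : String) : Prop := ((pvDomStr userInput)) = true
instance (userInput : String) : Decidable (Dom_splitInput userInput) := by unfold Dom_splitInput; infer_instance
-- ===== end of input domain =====

-- B replaces A's split-into-all-tokens + rebuild-remainder concatenation loop by a single
-- find of the first space and two slices (objective: simpler; return value only, no mutation).

-- ===== PORT A =====
def splitInput (userInput : String) : List String :=
  -- splitArray = userInput.split(' ')
  let splitArray := PySem.Chars.splitOn userInput.toList [' ']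
  -- returnArray.append(splitArray[0]): str.split(' ') never returns an empty list, so index 0 is total
  let first := PySem.List.pyGetD splitArray 0 []
  -- splitArray.pop(0)
  let splitArray := splitArray.drop 1
  if splitArray.length > 0 then
    -- for word in splitArray: restOfString += word + " "
    let restOfString := splitArray.foldl (fun acc word => acc ++ (word ++ [' '])) []
    [String.ofList first, String.ofList (PySem.Chars.rstrip restOfString)]
  else
    [String.ofList first, " "]

-- ===== PORT B =====
def splitInput_alt (userInput : String) : List String :=
  let idx := PySem.Chars.find userInput.toList [' ']
  if idx = -1 then
    [userInput, " "]
  else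
    [String.ofList (PySem.List.slice userInput.toList none (some idx)),
     String.ofList (PySem.Chars.rstrip (PySem.List.slice userInput.toList (some (idx + 1)) none))]

-- ===== PRECONDITION & SPEC =====
def Spec_splitInput (userInput : String) (out : List String) : Prop := out = splitInput_alt userInput
instance (userInput : String) (out : List String) : Decidable (Spec_splitInput userInput out) := by unfold Spec_splitInput; infer_instance

-- ===== CLAIM (what is proved, stated in full; the proofs are below) =====
def Claim_equal_splitInput : Prop := ∀ (userInput : String), Dom_splitInput userInput → Spec_splitInput userInput (splitInput userInput)

-- ===== LEMMAS AND PROOFS =====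

-- find.go on the single-character pattern [' ']: first space index (offset by k), or -1.
theorem pv_find_go (cs : List Char) (k : Nat) :
    PySem.Chars.find.go [' '] cs k
      = (match cs.dropWhile (fun c => !(c == ' ')) with
         | [] => -1
         | _ :: _ => ((k : Int) + (cs.takeWhile (fun c => !(c == ' '))).length)) := by
  induction cs generalizing k with
  | nil => simp [PySem.Chars.find.go]
  | cons c rest ih =>
    by_cases hc : c = ' '
    · subst hc
      simp [PySem.Chars.find.go, List.isPrefixOf]
    · have hb : (' ' == c) = false := by
        simp; exact fun h => hc h.symm
      simp only [PySem.Chars.find.go, List.isPrefixOf, hb, Bool.false_and,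
                 List.dropWhile_cons, List.takeWhile_cons]
      rw [ih (k + 1)]
      have hc' : (c == ' ') = false := by simp; exact hc
      simp only [hc', Bool.not_false, if_true]
      cases rest.dropWhile (fun c => !(c == ' ')) with
      | nil => simp
      | cons d t => simp; ring

-- splitOn's fuel worker on the single-character separator [' '], for sufficient fuel.
theorem pv_splitOn_go (fuel : Nat) (l cur : List Char) (acc : List (List Char))
    (h : l.length < fuel) :
    PySem.Chars.splitOn.go [' '] fuel l cur acc
      = acc.reverse ++ (List.splitOnP (fun c => c == ' ') l).modifyHead (cur.reverse ++ ·) := by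
  induction fuel generalizing l cur acc with
  | zero => omega
  | succ fuel ih =>
    cases l with
    | nil => simp [PySem.Chars.splitOn.go, List.splitOnP_nil]
    | cons c rest =>
      by_cases hc : c = ' '
      · subst hc
        have hlen : rest.length < fuel := by simpa using Nat.lt_of_succ_lt_succ h
        simp only [PySem.Chars.splitOn.go, List.isPrefixOf, beq_self_eq_true, Bool.true_and]
        rw [if_pos trivial]
        simp only [List.length_cons, List.length_nil, List.drop_succ_cons, List.drop_zero]
        rw [ih rest [] (cur.reverse :: acc) hlen]
        simp only [List.splitOnP_cons, beq_self_eq_true, if_pos, List.reverse_cons,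
                   List.append_assoc, List.modifyHead_cons, List.nil_append,
                   List.cons_append]
        cases List.splitOnP (fun c => c == ' ') rest <;> simp
      · have hb : ([' '] : List Char).isPrefixOf (c :: rest) = false := by
          simp [List.isPrefixOf]; exact fun h => hc h.symm
        have hlen : rest.length < fuel := by simpa using Nat.lt_of_succ_lt_succ h
        simp only [PySem.Chars.splitOn.go, hb]
        rw [ih rest (c :: cur) acc hlen]
        have hc' : (c == ' ') = false := by simp; exact hc
        cases h2 : List.splitOnP (fun c => c == ' ') rest with
        | nil => exact absurd h2 (List.splitOnP_ne_nil _ _)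
        | cons hd tl => simp [List.splitOnP_cons, hc', h2]

-- userInput.split(' ') is List.splitOnP (· == ' ').
theorem pv_splitOn_eq (cs : List Char) :
    PySem.Chars.splitOn cs [' '] = List.splitOnP (fun c => c == ' ') cs := by
  have h := pv_splitOn_go (cs.length + 1) cs [] [] (by omega)
  rw [show PySem.Chars.splitOn cs [' '] = PySem.Chars.splitOn.go [' '] (cs.length + 1) cs [] []
        from rfl, h]
  cases h2 : List.splitOnP (fun c => c == ' ') cs with
  | nil => exact absurd h2 (List.splitOnP_ne_nil _ _)
  | cons hd tl => simp

-- splitOnP's head is the space-free prefix; its tail restarts after the first space.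
theorem pv_splitOnP_head_tail (cs : List Char) :
    List.splitOnP (fun c => c == ' ') cs
      = cs.takeWhile (fun c => !(c == ' '))
        :: (match cs.dropWhile (fun c => !(c == ' ')) with
            | [] => []
            | _ :: rest => List.splitOnP (fun c => c == ' ') rest) := by
  induction cs with
  | nil => simp [List.splitOnP_nil]
  | cons c rest ih =>
    by_cases hc : c = ' '
    · subst hc; simp [List.splitOnP_cons]
    · have hc' : (c == ' ') = false := by simp; exact hc
      simp only [List.splitOnP_cons, hc', List.takeWhile_cons, List.dropWhile_cons,
                 Bool.not_false, if_true, ih, List.modifyHead, Bool.false_eq_true, if_false]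

-- Re-joining each piece with a trailing space reproduces the string plus one final space.
theorem pv_flatMap_splitOnP (cs : List Char) :
    (List.splitOnP (fun c => c == ' ') cs).flatMap (fun w => w ++ [' ']) = cs ++ [' '] := by
  induction cs with
  | nil => simp [List.splitOnP_nil]
  | cons c rest ih =>
    by_cases hc : c = ' '
    · subst hc; simp [List.splitOnP_cons, ih]
    · have hc' : (c == ' ') = false := by simp; exact hc
      cases h2 : List.splitOnP (fun c => c == ' ') rest with
      | nil => exact absurd h2 (List.splitOnP_ne_nil _ _)
      | cons hd tl =>
        rw [h2] at ih
        simp only [List.splitOnP_cons, hc', h2, List.modifyHead,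
                   List.flatMap_cons] at *
        simp only [List.cons_append, List.append_assoc] at *
        simpa using ih

-- rstrip ignores a trailing space.
theorem pv_rstrip_space (xs : List Char) :
    PySem.Chars.rstrip (xs ++ [' ']) = PySem.Chars.rstrip xs := by
  simp [PySem.Chars.rstrip, List.reverse_append,
        show PySem.Chars.isspace ' ' = true from by decide]

-- find cs ' ' in terms of takeWhile/dropWhile.
theorem pv_find_eq (cs : List Char) :
    PySem.Chars.find cs [' ']
      = (match cs.dropWhile (fun c => !(c == ' ')) with
         | [] => -1
         | _ :: _ => ((cs.takeWhile (fun c => !(c == ' '))).length : Int)) := by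
  have h := pv_find_go cs 0
  rw [show PySem.Chars.find cs [' '] = PySem.Chars.find.go [' '] cs 0 from rfl, h]
  cases cs.dropWhile (fun c => !(c == ' ')) with
  | nil => rfl
  | cons d t => simp

-- ===== VERDICT (by name: the statement is the Claim_ definition above) =====
theorem splitInput_spec : Claim_equal_splitInput := by
  intro s _
  unfold Spec_splitInput splitInput splitInput_alt
  rw [pv_splitOn_eq, pv_find_eq]
  cases hdw : (s.toList).dropWhile (fun c => !(c == ' ')) with
  | nil =>
    -- no space in the input
    have htw : (s.toList).takeWhile (fun c => !(c == ' ')) = s.toList := by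
      conv_rhs => rw [← List.takeWhile_append_dropWhile
        (p := fun c => !(c == ' ')) (l := s.toList), hdw]
      simp
    rw [pv_splitOnP_head_tail, hdw, htw]
    simp [PySem.List.pyGetD, PySem.List.pyGet?, PySem.List.pyIdx?, String.ofList_toList]
  | cons d suf =>
    have hd : d = ' ' := by
      have hne : (s.toList).dropWhile (fun c => !(c == ' ')) ≠ [] := by rw [hdw]; simp
      have h3 := List.head_dropWhile_not (fun c => !(c == ' ')) hne
      have h6 : ((s.toList).dropWhile (fun c => !(c == ' '))).head? = some d := by
        rw [hdw]; rfl
      rw [List.head?_eq_some_head hne] at h6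
      rw [Option.some_inj.mp h6] at h3
      simpa using h3
    subst hd
    have hcs : (s.toList).takeWhile (fun c => !(c == ' ')) ++ ' ' :: suf = s.toList := by
      conv_rhs => rw [← List.takeWhile_append_dropWhile
        (p := fun c => !(c == ' ')) (l := s.toList)]
      rw [hdw]
    rw [pv_splitOnP_head_tail, hdw]
    set pre := (s.toList).takeWhile (fun c => !(c == ' ')) with hpre
    have hnot : ((pre.length : Int) = -1) = False := by simp
    have htake : s.toList.take pre.length = pre :=
      (List.prefix_iff_eq_take.mp (by rw [hpre]; exact List.takeWhile_prefix _)).symm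
    have hdrop : s.toList.drop (pre.length + 1) = suf := by
      rw [← hcs, show pre ++ ' ' :: suf = (pre ++ [' ']) ++ suf by simp]
      rw [show pre.length + 1 = (pre ++ [' ']).length by simp]
      exact List.drop_left
    have hfold : (List.splitOnP (fun c => c == ' ') suf).foldl
        (fun acc word => acc ++ (word ++ [' '])) [] = suf ++ [' '] := by
      rw [PySem.List.foldl_append_eq_flatMap (fun w => w ++ [' '])]
      simp [pv_flatMap_splitOnP]
    have hlen : (List.splitOnP (fun c => c == ' ') suf).length > 0 :=
      List.length_pos_of_ne_nil (List.splitOnP_ne_nil _ _)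
    simp only [List.drop_succ_cons, List.drop_zero, hlen, if_pos, hnot, if_false,
               PySem.List.pyGetD, PySem.List.pyGet?, PySem.List.pyIdx?]
    rw [PySem.List.slice_to _ (by positivity : (0:Int) ≤ (pre.length : Int)),
        PySem.List.slice_from _ (by positivity : (0:Int) ≤ ((pre.length : Int) + 1))]
    have h1 : ((pre.length : Int)).toNat = pre.length := by omega
    have h2 : ((pre.length : Int) + 1).toNat = pre.length + 1 := by omega
    rw [h1, h2, htake, hdrop, hfold, pv_rstrip_space]
    simp
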